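-- pv_equiv track=rewrite | github.com/Dude-0313/Turbofan | TF_EDA_RUL_All_XGB.py | assign_class
-- ===== SOURCE A (Python) =====
-- def assign_class(rul_in):
--     lbl_class= []
--     for i in rul_in:
--         if(i < 50) :
--             lbl_class.append(0)
--         elif (i < 100):
--             lbl_class.append(1)
--         else :
--             lbl_class.append(2)
--     return lbl_class
-- ===== SOURCE B (Python) =====
-- def assign_class(rul_in):
--     # Table-driven: class = insertion point of x in the sorted threshold table,
--     # found by binary search (bisect_right), instead of a branch cascade.
--     bounds = [50, 100]
--     out = []
--     for x in rul_in:
--         lo, hi = 0, len(bounds)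
--         while lo < hi:
--             mid = (lo + hi) // 2
--             if x < bounds[mid]:
--                 hi = mid
--             else:
--                 lo = mid + 1
--         out.append(lo)
--     return out
-- ===== Notes on version B (the rewrite author's own statement) =====
-- stated objective: alternative
-- what changed: Replaces the hard-coded if/elif threshold cascade with a sorted threshold boundary table and a bisect_right-style binary search that returns the insertion point as the class label.
import Mathlib
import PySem

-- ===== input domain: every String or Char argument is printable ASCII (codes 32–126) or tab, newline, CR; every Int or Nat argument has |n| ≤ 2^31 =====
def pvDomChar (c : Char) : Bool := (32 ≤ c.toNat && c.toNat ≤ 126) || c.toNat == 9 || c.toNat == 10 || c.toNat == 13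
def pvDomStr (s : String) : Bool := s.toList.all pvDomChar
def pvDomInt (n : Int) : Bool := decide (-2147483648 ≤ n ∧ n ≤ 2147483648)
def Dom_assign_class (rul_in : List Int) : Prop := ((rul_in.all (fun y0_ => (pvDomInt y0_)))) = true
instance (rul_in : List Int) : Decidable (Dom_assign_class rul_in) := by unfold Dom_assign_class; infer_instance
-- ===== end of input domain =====

-- B replaces A's if/elif cascade with a sorted threshold boundary table queried by a bisect_right-style binary search (alternative structure, same cost).


-- ===== PORT A =====
def assign_class (rul_in : List Int) : List Int :=
  rul_in.foldl (fun lbl_class i =>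
    if i < 50 then lbl_class ++ [0]
    else if i < 100 then lbl_class ++ [1]
    else lbl_class ++ [2]) []

-- ===== PORT B =====
-- the while-loop of Source B, with fuel = hi - lo as a totality guard (each iteration shrinks the range, so the
-- fuel never runs out); bounds[mid] is always in range (0 <= mid < hi <= len bounds), so getD's default is never used
def bsGo (bounds : List Int) (x : Int) (lo hi fuel : Nat) : Nat :=
  match fuel with
  | 0 => lo
  | fuel + 1 =>
    if lo < hi then
      let mid := (lo + hi) / 2
      if x < bounds.getD mid 0 then bsGo bounds x lo mid fuel
      else bsGo bounds x (mid + 1) hi fuel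
    else lo

def bsLoop (bounds : List Int) (x : Int) (lo hi : Nat) : Nat :=
  bsGo bounds x lo hi (hi - lo)

def assign_class_alt (rul_in : List Int) : List Int :=
  (rul_in.foldl (fun out x => out ++ [(bsLoop [50, 100] x 0 ([50, 100] : List Int).length : Int)]) [])

-- ===== PRECONDITION & SPEC =====
def Spec_assign_class (rul_in : List Int) (out : List Int) : Prop := out = assign_class_alt rul_in
instance (rul_in : List Int) (out : List Int) : Decidable (Spec_assign_class rul_in out) := by unfold Spec_assign_class; infer_instance

-- ===== CLAIM (what is proved, stated in full; the proofs are below) =====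
def Claim_equal_assign_class : Prop := ∀ (rul_in : List Int), Dom_assign_class rul_in → Spec_assign_class rul_in (assign_class rul_in)

-- ===== LEMMAS AND PROOFS =====
theorem bs_eval (x : Int) :
    (bsLoop [50, 100] x 0 2 : Int) = if x < 50 then 0 else if x < 100 then 1 else 2 := by
  simp only [bsLoop, bsGo, List.getD]
  norm_num
  split_ifs <;> simp_all
  omega

theorem folds_agree (rul_in : List Int) (accA accB : List Int) (h : accA = accB) :
    rul_in.foldl (fun lbl_class i =>
      if i < 50 then lbl_class ++ [0]
      else if i < 100 then lbl_class ++ [1]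
      else lbl_class ++ [2]) accA
    = rul_in.foldl (fun out x => out ++ [(bsLoop [50, 100] x 0 ([50, 100] : List Int).length : Int)]) accB := by
  induction rul_in generalizing accA accB with
  | nil => simpa
  | cons x xs ih =>
    simp only [List.foldl_cons]
    apply ih
    subst h
    have hl : ([50, 100] : List Int).length = 2 := rfl
    rw [hl, bs_eval]
    split_ifs <;> rfl

-- ===== VERDICT (by name: the statement is the Claim_ definition above) =====
theorem assign_class_spec : Claim_equal_assign_class := by
  intro rul_in _
  unfold Spec_assign_class assign_class assign_class_alt
  exact folds_agree rul_in [] [] rfl
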